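-- pv_equiv track=rewrite | github.com/doanhnguyen99/Graduation-Thesis | embedding/get_tag_embedd.py | dict_of_tags
-- ===== SOURCE A (Python) =====
-- def dict_of_tags(tag_list):
--     dic = {'pad': 0}
--     index = 0
--     for tags in tag_list:
--         for tag in tags:
--             try:
--                 dic[tag]
--             except:
--                 index = index + 1
--                 dic[tag]= index
--     return dic, len(dic)
-- ===== SOURCE B (Python) =====
-- def dict_of_tags(tag_list):
--     flat = [t for tags in tag_list for t in tags]
--     uniq = [t for t in dict.fromkeys(flat) if t != 'pad']
--     pairs = [('pad', 0)] + [(t, i + 1) for i, t in enumerate(uniq)]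
--     return dict(pairs), len(pairs)
-- ===== Notes on version B (the rewrite author's own statement) =====
-- stated objective: alternative
-- what changed: B has no dict-building loop at all: it flattens, dedupes with dict.fromkeys, filters out 'pad', builds the final (tag, index) pair list directly with enumerate and returns dict(pairs); A instead threads a dict and a counter through a nested scan with a try/except membership probe.
import Mathlib
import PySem

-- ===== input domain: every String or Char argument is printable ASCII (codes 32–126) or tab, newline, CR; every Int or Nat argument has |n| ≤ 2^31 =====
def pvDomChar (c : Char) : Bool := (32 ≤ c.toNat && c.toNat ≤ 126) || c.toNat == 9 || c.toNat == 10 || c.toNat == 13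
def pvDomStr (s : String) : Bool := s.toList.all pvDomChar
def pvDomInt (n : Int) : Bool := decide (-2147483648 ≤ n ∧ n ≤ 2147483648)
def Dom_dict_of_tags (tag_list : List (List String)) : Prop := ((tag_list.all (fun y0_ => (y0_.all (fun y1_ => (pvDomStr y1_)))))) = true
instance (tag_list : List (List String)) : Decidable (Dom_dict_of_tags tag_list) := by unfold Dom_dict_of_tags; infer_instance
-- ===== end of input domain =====

-- B builds the final (tag, index) pair list directly (dedup, filter out 'pad', enumerate) instead of A's nested dict-and-counter scan; same result.
-- ===== PORT A =====
-- A's loop body: try dic[tag] except: index += 1; dic[tag] = index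
def stepA (st : PySem.Dict String Int × Int) (tag : String) : PySem.Dict String Int × Int :=
  if st.1.contains tag then st else (st.1.insert tag (st.2 + 1), st.2 + 1)

def dict_of_tags (tag_list : List (List String)) : (List (String × Int)) × Int :=
  -- dic = {'pad': 0}; index = 0
  let st :=
    tag_list.foldl (fun st tags => tags.foldl stepA st)
      (((PySem.Dict.empty : PySem.Dict String Int).insert "pad" 0), (0 : Int))
  (st.1.items, (st.1.size : Int))

-- ===== PORT B =====
def dict_of_tags_alt (tag_list : List (List String)) : (List (String × Int)) × Int :=
  -- flat = [t for tags in tag_list for t in tags]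
  let flat := tag_list.flatten
  -- uniq = [t for t in dict.fromkeys(flat) if t != 'pad']
  let uniq := (PySem.List.dedup flat).filter (fun t => t ≠ "pad")
  -- pairs = [('pad', 0)] + [(t, i + 1) for i, t in enumerate(uniq)]
  let pairs := ("pad", (0 : Int)) :: (PySem.List.enumerate uniq).map (fun p => (p.2, p.1 + 1))
  -- return dict(pairs), len(pairs)
  ((PySem.Dict.ofList pairs).items, (pairs.length : Int))

-- ===== PRECONDITION & SPEC =====
def Spec_dict_of_tags (tag_list : List (List String)) (out : (List (String × Int)) × Int) : Prop := out = dict_of_tags_alt tag_list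
instance (tag_list : List (List String)) (out : (List (String × Int)) × Int) : Decidable (Spec_dict_of_tags tag_list out) := by unfold Spec_dict_of_tags; infer_instance

-- ===== CLAIM (what is proved, stated in full; the proofs are below) =====
def Claim_equal_dict_of_tags : Prop := ∀ (tag_list : List (List String)), Dom_dict_of_tags tag_list → Spec_dict_of_tags tag_list (dict_of_tags tag_list)

-- ===== LEMMAS AND PROOFS =====

theorem contains_stepA (st : PySem.Dict String Int × Int) (t x : String)
    (hx : st.1.contains x = true) : (stepA st t).1.contains x = true := by
  unfold stepA
  split_ifs with h
  · exact hx
  · simp [PySem.Dict.contains_insert, hx]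

theorem contains_self_stepA (st : PySem.Dict String Int × Int) (t : String) :
    (stepA st t).1.contains t = true := by
  unfold stepA
  split_ifs with h
  · exact h
  · exact PySem.Dict.contains_insert_self _ _ _

theorem contains_foldA (l : List String) (st : PySem.Dict String Int × Int) (t : String)
    (h : t ∈ l ∨ st.1.contains t = true) : (l.foldl stepA st).1.contains t = true := by
  induction l generalizing st with
  | nil => simpa using h
  | cons a l ih =>
    simp only [List.foldl_cons]
    refine ih (stepA st a) ?_
    rcases h with h' | h'
    · by_cases hta : t = a
      · subst hta; exact Or.inr (contains_self_stepA st t)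
      · exact Or.inl ((List.mem_cons.mp h').resolve_left hta)
    · exact Or.inr (contains_stepA st a t h')

-- A's fold ignores duplicates: folding over the ordered dedup accumulation equals folding over the raw list
theorem foldA_dedup_aux (l : List String) (s : List String) (st : PySem.Dict String Int × Int) :
    (l.foldl PySem.Set.add s).foldl stepA st = l.foldl stepA (s.foldl stepA st) := by
  induction l generalizing s with
  | nil => rfl
  | cons t l ih =>
    simp only [List.foldl_cons]
    rw [ih (PySem.Set.add s t)]
    congr 1
    by_cases h : t ∈ s
    · rw [show PySem.Set.add s t = s by simp [PySem.Set.add, PySem.Set.contains, h]]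
      have hc := contains_foldA s st t (Or.inl h)
      simp [stepA, hc]
    · rw [show PySem.Set.add s t = s ++ [t] by simp [PySem.Set.add, PySem.Set.contains, h]]
      rw [List.foldl_append]
      rfl

theorem foldA_dedup (l : List String) (st : PySem.Dict String Int × Int) :
    (PySem.List.dedup l).foldl stepA st = l.foldl stepA st := by
  rw [PySem.List.dedup_eq_ofList, PySem.Set.ofList_eq_foldl]
  exact foldA_dedup_aux l [] st

-- A's fold skips every occurrence of a key already present, in particular 'pad'
theorem foldA_filter_pad (l : List String) (st : PySem.Dict String Int × Int)
    (h : st.1.contains "pad" = true) :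
    l.foldl stepA st = (l.filter (fun t => t ≠ "pad")).foldl stepA st := by
  induction l generalizing st with
  | nil => rfl
  | cons a l ih =>
    by_cases ha : a = "pad"
    · subst ha
      have : stepA st "pad" = st := by simp [stepA, h]
      simp only [List.foldl_cons, List.filter_cons]
      simp [this, ih st h]
    · simp only [List.foldl_cons, List.filter_cons]
      have : (decide (a ≠ "pad")) = true := by simp [ha]
      rw [this]
      simp only [if_true]
      exact ih (stepA st a) (contains_stepA st a _ h)

-- A's fold over distinct fresh keys appends exactly B's enumerated pairs
theorem foldA_fresh (l : List String) (d : PySem.Dict String Int) (i : Int)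
    (hnd : l.Nodup) (hf : ∀ t ∈ l, d.contains t = false) :
    (l.foldl stepA (d, i)).1.items
      = d.items ++ (PySem.List.enumerate l i).map (fun p => (p.2, p.1 + 1)) := by
  induction l generalizing d i with
  | nil => simp [PySem.List.enumerate_nil]
  | cons a l ih =>
    have hfa : d.contains a = false := hf a (List.mem_cons_self ..)
    have hstep : stepA (d, i) a = (d.insert a (i + 1), i + 1) := by simp [stepA, hfa]
    simp only [List.foldl_cons, hstep]
    have hnd' : l.Nodup := hnd.of_cons
    have hf' : ∀ t ∈ l, (d.insert a (i + 1)).contains t = false := by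
      intro t ht
      have hta : t ≠ a := by
        rintro rfl; exact (List.nodup_cons.mp hnd).1 ht
      rw [PySem.Dict.contains_insert]
      simp [hta, hf t (List.mem_cons_of_mem _ ht)]
    rw [ih (d.insert a (i + 1)) (i + 1) hnd' hf', PySem.List.enumerate_cons]
    simp [PySem.Dict.items_insert, hfa]

-- dict(pairs) on distinct keys keeps exactly the pair list
theorem items_ofList_nodup (pairs : List (String × Int)) (hnd : (pairs.map (·.1)).Nodup) :
    (PySem.Dict.ofList pairs).items = pairs := by
  have h := PySem.Dict.items_foldl_insert_fresh (l := pairs) (k := (·.1)) (v := (·.2))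
      (d := (PySem.Dict.empty : PySem.Dict String Int))
      (by intro a _; exact PySem.Dict.contains_empty _) hnd
  have he : (PySem.Dict.empty : PySem.Dict String Int).items = [] := rfl
  simpa [PySem.Dict.ofList, PySem.Dict.update, he] using h

-- ===== VERDICT (by name: the statement is the Claim_ definition above) =====
theorem dict_of_tags_spec : Claim_equal_dict_of_tags := by
  intro tag_list _
  unfold Spec_dict_of_tags dict_of_tags dict_of_tags_alt
  have hflat : tag_list.foldl (fun st tags => tags.foldl stepA st)
      (((PySem.Dict.empty : PySem.Dict String Int).insert "pad" 0), (0 : Int))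
      = tag_list.flatten.foldl stepA
      (((PySem.Dict.empty : PySem.Dict String Int).insert "pad" 0), (0 : Int)) :=
    List.foldl_flatten.symm
  set d0 : PySem.Dict String Int := (PySem.Dict.empty : PySem.Dict String Int).insert "pad" 0 with hd0
  set uniq : List String := (PySem.List.dedup tag_list.flatten).filter (fun t => t ≠ "pad") with huq
  -- A's fold reduced to a fold over the deduped, 'pad'-free list of fresh keys
  have hpad : d0.contains "pad" = true := by rw [hd0]; exact PySem.Dict.contains_insert_self _ _ _
  have hchain : tag_list.flatten.foldl stepA (d0, (0 : Int)) = uniq.foldl stepA (d0, (0 : Int)) := by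
    rw [← foldA_dedup, foldA_filter_pad _ _ hpad]
  have hnd : uniq.Nodup := (PySem.List.nodup_dedup _).filter _
  have hfresh : ∀ t ∈ uniq, d0.contains t = false := by
    intro t ht
    have htp : t ≠ "pad" := by
      have := List.of_mem_filter ht; simpa using this
    rw [hd0, PySem.Dict.contains_insert]
    simp [htp, PySem.Dict.contains_empty]
  have hitems := foldA_fresh uniq d0 0 hnd hfresh
  -- B's pair list
  set pairs : List (String × Int) :=
    ("pad", (0 : Int)) :: (PySem.List.enumerate uniq).map (fun p => (p.2, p.1 + 1)) with hpp
  have hkeys : (pairs.map (·.1)).Nodup := by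
    rw [hpp]
    simp only [List.map_cons, List.map_map]
    have : ((PySem.List.enumerate uniq).map ((·.1) ∘ fun p => (p.2, p.1 + 1))) = uniq :=
      PySem.List.map_snd_enumerate uniq 0
    rw [this, List.nodup_cons]
    refine ⟨?_, hnd⟩
    intro hmem
    have := List.of_mem_filter hmem; simp at this
  have hB := items_ofList_nodup pairs hkeys
  have hAitems : (tag_list.flatten.foldl stepA (d0, (0 : Int))).1.items = pairs := by
    rw [hchain, hitems, hpp, hd0]
    have he : (PySem.Dict.empty : PySem.Dict String Int).items = [] := rfl
    simp [PySem.Dict.items_insert, PySem.Dict.contains_empty, he]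
  have hsize : ((tag_list.flatten.foldl stepA (d0, (0 : Int))).1.size : Int) = (pairs.length : Int) := by
    have : (tag_list.flatten.foldl stepA (d0, (0 : Int))).1.size = pairs.length := by
      rw [PySem.Dict.size, hAitems]  -- size = items.length
    rw [this]
  simp only [hflat]
  rw [hB, hAitems, hsize]
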